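-- pv_equiv track=rewrite | github.com/BagerDiren/devamli | inject_detail_discussion.py | find_anchor
-- ===== SOURCE A (Python) =====
-- def find_anchor(xml: str, anchor: str, used_offset: int = 0) -> int:
--     """Return the byte position of <w:p> opening that contains the given anchor text.
--     used_offset lets us skip earlier matches when the same anchor appears multiple times.
--     """
--     idx = xml.find(anchor, used_offset)
--     if idx == -1:
--         return -1
--     p_start = xml.rfind('<w:p>', 0, idx)
--     p_start_alt = xml.rfind('<w:p ', 0, idx)
--     candidates = [c for c in (p_start, p_start_alt) if c != -1]
--     return max(candidates) if candidates else -1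
-- ===== SOURCE B (Python) =====
-- def find_anchor(xml: str, anchor: str, used_offset: int = 0) -> int:
--     """Return the byte position of <w:p> opening that contains the given anchor text.
--     used_offset lets us skip earlier matches when the same anchor appears multiple times.
--     """
--     idx = xml.find(anchor, used_offset)
--     if idx == -1:
--         return -1
--     pre = xml[:idx]
--     best = -1
--     for i in range(len(pre) - 4):
--         seg = pre[i:i + 5]
--         if seg == '<w:p>' or seg == '<w:p ':
--             best = i
--     return best
-- ===== Notes on version B (the rewrite author's own statement) =====
-- stated objective: alternative
-- what changed: Replaces the two backward rfind calls plus max/candidates logic with a single forward scan over the prefix before the anchor that remembers the last position where a 5-character window equals '<w:p>' or '<w:p '.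
import Mathlib
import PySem

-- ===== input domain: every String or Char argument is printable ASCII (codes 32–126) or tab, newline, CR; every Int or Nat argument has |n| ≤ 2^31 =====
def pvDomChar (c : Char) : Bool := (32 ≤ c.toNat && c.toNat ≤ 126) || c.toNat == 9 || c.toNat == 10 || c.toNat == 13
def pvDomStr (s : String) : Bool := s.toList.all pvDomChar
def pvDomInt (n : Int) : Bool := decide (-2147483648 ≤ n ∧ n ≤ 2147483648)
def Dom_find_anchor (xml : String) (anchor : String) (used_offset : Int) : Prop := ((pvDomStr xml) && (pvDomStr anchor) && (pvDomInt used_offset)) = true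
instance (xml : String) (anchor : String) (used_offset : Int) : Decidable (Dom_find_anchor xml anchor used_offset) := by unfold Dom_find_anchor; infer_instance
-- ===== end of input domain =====

-- B replaces A's two backward rfind calls plus candidates/max logic with one forward scan over the
-- prefix before the anchor that remembers the last 5-character window equal to "<w:p>" or "<w:p "
-- (alternative decomposition, same asymptotic cost).

-- ===== PORT A =====
def find_anchor (xml : String) (anchor : String) (used_offset : Int) : Int :=
  let idx := PySem.Str.findFrom xml anchor used_offset
  if idx = -1 then -1
  else
    let p_start := PySem.Str.rfindFrom xml "<w:p>" 0 (some idx)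
    let p_start_alt := PySem.Str.rfindFrom xml "<w:p " 0 (some idx)
    let candidates := List.filter (fun c => c != -1) [p_start, p_start_alt]
    match PySem.List.max? candidates id with
    | some m => m
    | none => -1

-- ===== PORT B =====
def find_anchor_alt (xml : String) (anchor : String) (used_offset : Int) : Int :=
  let idx := PySem.Str.findFrom xml anchor used_offset
  if idx = -1 then -1
  else
    let pre := PySem.Str.slice xml none (some idx)
    (PySem.List.pyRange 0 (PySem.Str.len pre - 4) 1).foldl
      (fun best i =>
        let seg := PySem.Str.slice pre (some i) (some (i + 5))
        if seg = "<w:p>" ∨ seg = "<w:p " then i else best) (-1)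

-- ===== PRECONDITION & SPEC =====
def Spec_find_anchor (xml : String) (anchor : String) (used_offset : Int) (out : Int) : Prop := out = find_anchor_alt xml anchor used_offset
instance (xml : String) (anchor : String) (used_offset : Int) (out : Int) : Decidable (Spec_find_anchor xml anchor used_offset out) := by unfold Spec_find_anchor; infer_instance

-- ===== CLAIM (what is proved, stated in full; the proofs are below) =====
def Claim_equal_find_anchor : Prop := ∀ (xml : String) (anchor : String) (used_offset : Int), Dom_find_anchor xml anchor used_offset → Spec_find_anchor xml anchor used_offset (find_anchor xml anchor used_offset)

-- ===== LEMMAS AND PROOFS =====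

def pvBest (Q : Nat → Prop) [DecidablePred Q] : Nat → Int
  | 0 => -1
  | m + 1 => if Q m then (m : Int) else pvBest Q m

theorem pvBest_neg_one_le (Q : Nat → Prop) [DecidablePred Q] (m : Nat) : -1 ≤ pvBest Q m := by
  induction m with
  | zero => simp [pvBest]
  | succ m ih => unfold pvBest; split <;> omega

theorem pvBest_lt (Q : Nat → Prop) [DecidablePred Q] (m : Nat) : pvBest Q m < (m : Int) := by
  induction m with
  | zero => simp [pvBest]
  | succ m ih => unfold pvBest; split <;> push_cast <;> omega

theorem pvBest_or (Q1 Q2 : Nat → Prop) [DecidablePred Q1] [DecidablePred Q2] (m : Nat) :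
    pvBest (fun i => Q1 i ∨ Q2 i) m = max (pvBest Q1 m) (pvBest Q2 m) := by
  induction m with
  | zero => simp [pvBest]
  | succ m ih =>
    have h1 := pvBest_lt Q1 m
    have h2 := pvBest_lt Q2 m
    unfold pvBest
    by_cases hq1 : Q1 m <;> by_cases hq2 : Q2 m <;>
      simp [hq1, hq2, ih, max_def] <;> omega

theorem pvBest_congr (Q1 Q2 : Nat → Prop) [DecidablePred Q1] [DecidablePred Q2] (m : Nat)
    (h : ∀ i, i < m → (Q1 i ↔ Q2 i)) : pvBest Q1 m = pvBest Q2 m := by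
  induction m with
  | zero => rfl
  | succ m ih =>
    unfold pvBest
    rw [if_congr (h m (by omega)) rfl rfl, ih (fun i hi => h i (by omega))]

theorem pvBest_ext (Q : Nat → Prop) [DecidablePred Q] (m m' : Nat) (hle : m ≤ m')
    (h : ∀ i, m ≤ i → i < m' → ¬ Q i) : pvBest Q m' = pvBest Q m := by
  induction m' with
  | zero =>
    have hm : m = 0 := by omega
    rw [hm]
  | succ m' ih =>
    rcases Nat.eq_or_lt_of_le hle with h' | h'
    · rw [h']
    · rw [show pvBest Q (m' + 1) = if Q m' then (m' : Int) else pvBest Q m' from rfl]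
      rw [if_neg (h m' (by omega) (by omega)), ih (by omega) (fun i hi hi' => h i hi (by omega))]

theorem rfind_go_eq_pvBest (cs sub : List Char) (j : Nat) :
    PySem.Chars.rfind.go cs sub j = pvBest (fun i => sub.isPrefixOf (cs.drop i) = true) (j + 1) := by
  induction j with
  | zero => simp [PySem.Chars.rfind.go, pvBest]
  | succ j ih => rw [PySem.Chars.rfind.go, pvBest, ih]

theorem rfind_eq_pvBest (cs sub : List Char) :
    PySem.Chars.rfind cs sub = pvBest (fun i => sub <+: cs.drop i) (cs.length + 1) := by
  rw [PySem.Chars.rfind, rfind_go_eq_pvBest]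
  exact pvBest_congr _ _ _ (fun i _ => by rw [List.isPrefixOf_iff_prefix])

theorem foldl_range_eq_pvBest (Q : Nat → Prop) [DecidablePred Q] (m : Nat) :
    (List.range m).foldl (fun b k => if Q k then (k : Int) else b) (-1) = pvBest Q m := by
  induction m with
  | zero => rfl
  | succ m ih => rw [List.range_succ, List.foldl_append, ih]; rfl

theorem take_eq_iff_prefix (l p : List Char) (h : p.length = 5) : l.take 5 = p ↔ p <+: l := by
  rw [List.prefix_iff_eq_take, h]; exact eq_comm

theorem window_iff (cs : List Char) (p : String) (hp : p.toList.length = 5) (k : Nat) :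
    PySem.Str.slice (String.ofList cs) (some (k : Int)) (some ((k : Int) + 5)) = p ↔
      p.toList <+: cs.drop k := by
  have hcast : ((k : Int) + 5) = ((k + 5 : Nat) : Int) := by push_cast; ring
  rw [show PySem.Str.slice (String.ofList cs) (some (k : Int)) (some ((k : Int) + 5)) =
      String.ofList (PySem.Chars.slice (String.ofList cs).toList (some (k : Int)) (some ((k : Int) + 5))) from rfl]
  rw [String.toList_ofList, PySem.Chars.slice_eq_listSlice, hcast, PySem.List.slice_natCast]
  have hn : k + 5 - k = 5 := by omega
  rw [hn]
  constructor
  · intro h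
    have h2 := congrArg String.toList h
    rw [String.toList_ofList] at h2
    exact (take_eq_iff_prefix _ _ hp).mp h2
  · intro h
    rw [(take_eq_iff_prefix _ _ hp).mpr h, String.ofList_toList]

theorem findFrom_nonneg (s sub : String) (start : Int)
    (h : PySem.Str.findFrom s sub start ≠ -1) : 0 ≤ PySem.Str.findFrom s sub start := by
  rw [PySem.Str.findFrom_eq] at h ⊢
  unfold PySem.Chars.findFrom at h ⊢
  simp only at h ⊢
  split_ifs at h ⊢ <;> try omega
  all_goals
    first
      | (have hf := PySem.Chars.neg_one_le_find (List.drop (Int.toNat 0) (List.take ((s.toList.length : Int)).toNat s.toList)) sub.toList; omega)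
      | (have hf := PySem.Chars.neg_one_le_find (List.drop (start + (s.toList.length : Int)).toNat (List.take ((s.toList.length : Int)).toNat s.toList)) sub.toList; omega)
      | (have hf := PySem.Chars.neg_one_le_find (List.drop start.toNat (List.take ((s.toList.length : Int)).toNat s.toList)) sub.toList; omega)

theorem rfindFrom_zero (s p : String) (idx : Int) (h0 : 0 ≤ idx) :
    PySem.Str.rfindFrom s p 0 (some idx) =
      PySem.Chars.rfind (s.toList.take idx.toNat) p.toList := by
  rw [PySem.Str.rfindFrom_eq]
  unfold PySem.Chars.rfindFrom
  simp only
  split_ifs with h1 h2 h3 h4 h5 h6 h7 h8 <;> try omega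
  all_goals simp only [Int.toNat_zero, List.drop_zero, Int.toNat_natCast, List.take_length] at *
  all_goals try rw [List.take_of_length_le (show s.toList.length ≤ idx.toNat by omega)]
  all_goals omega

theorem candidates_max (a b : Int) (ha : -1 ≤ a) (hb : -1 ≤ b) :
  (match PySem.List.max? (List.filter (fun c => c != -1) [a, b]) id with
   | some m => m | none => -1) = max a b := by
  by_cases ha1 : a = -1 <;> by_cases hb1 : b = -1
  · simp [ha1, hb1, PySem.List.max?]
  · have hb' : (b != -1) = true := by simpa using hb1
    simp [ha1, hb', PySem.List.max?, max_def]; omega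
  · have ha' : (a != -1) = true := by simpa using ha1
    simp [hb1, ha', PySem.List.max?, max_def]; omega
  · have ha' : (a != -1) = true := by simpa using ha1
    have hb' : (b != -1) = true := by simpa using hb1
    simp [ha', hb', PySem.List.max?, max_def]
    split_ifs <;> simp <;> omega

theorem find_anchor_eq_alt (xml anchor : String) (used_offset : Int) :
    find_anchor xml anchor used_offset = find_anchor_alt xml anchor used_offset := by
  unfold find_anchor find_anchor_alt
  simp only
  by_cases h : PySem.Str.findFrom xml anchor used_offset = -1
  · rw [if_pos h, if_pos h]
  · rw [if_neg h, if_neg h]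
    have h0 : 0 ≤ PySem.Str.findFrom xml anchor used_offset := findFrom_nonneg _ _ _ h
    set idx := PySem.Str.findFrom xml anchor used_offset with hidx
    set cs : List Char := xml.toList.take idx.toNat with hcs
    have hpre : PySem.Str.slice xml none (some idx) = String.ofList cs := by
      show String.ofList (PySem.Chars.slice xml.toList none (some idx)) = String.ofList cs
      rw [PySem.Chars.slice_eq_listSlice, PySem.List.slice_to _ h0]
    rw [hpre]
    -- A side
    rw [rfindFrom_zero _ _ _ h0, rfindFrom_zero _ _ _ h0]
    rw [rfind_eq_pvBest, rfind_eq_pvBest]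
    rw [candidates_max _ _ (pvBest_neg_one_le _ _) (pvBest_neg_one_le _ _)]
    rw [← pvBest_or]
    -- B side
    rw [PySem.Str.len_eq, String.toList_ofList]
    rw [PySem.List.pyRange_one, List.foldl_map]
    simp only [zero_add]
    rw [foldl_range_eq_pvBest (fun k => PySem.Str.slice (String.ofList cs) (some (k : Int)) (some ((k:Int) + 5)) = "<w:p>" ∨ PySem.Str.slice (String.ofList cs) (some (k : Int)) (some ((k:Int) + 5)) = "<w:p ")]
    simp only [String.toList_ofList]
    have hM : ((cs.length : Int) - 4 - 0).toNat = cs.length - 4 := by omega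
    rw [hM]
    have hL : (List.take idx.toNat xml.toList).length = cs.length := rfl
    refine Eq.trans (pvBest_ext _ (cs.length - 4) _ (by omega) ?h2) (pvBest_congr _ _ _ ?h3)
    case h2 =>
      intro i hi hi' hq
      have hmin : cs.length = min idx.toNat xml.toList.length := by rw [hcs, List.length_take]
      rcases hq with hq | hq <;>
      · have h5 := hq.length_le
        simp at h5 hmin
        omega
    case h3 =>
      intro k hk
      exact or_congr (window_iff cs "<w:p>" (by decide) k).symm (window_iff cs "<w:p " (by decide) k).symm

-- ===== VERDICT (by name: the statement is the Claim_ definition above) =====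
theorem find_anchor_spec : Claim_equal_find_anchor := by
  intro xml anchor used_offset _
  unfold Spec_find_anchor
  exact find_anchor_eq_alt xml anchor used_offset
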